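-- pv_equiv track=rewrite | github.com/andy0andy/auto_gen_video | GenerateVideo/prev_ready.py | trans_pn
-- ===== SOURCE A (Python) =====
-- def trans_pn(pn):
--     mark = list(map(chr, range(ord("a"), ord("z") + 1))) + list(map(chr, range(ord("A"), ord("Z") + 1))) + list(
--         map(chr, range(ord("0"), ord("9") + 1))) + ["_", "-"]
--     n_pn = ""
--
--     for w in pn:
--         if w in mark:
--             n_pn += w
--         else:
--             n_pn += "_"
--
--     return n_pn
-- ===== SOURCE B (Python) =====
-- import re
--
-- _DISALLOWED = re.compile(r'[^a-zA-Z0-9_-]')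
--
-- def trans_pn(pn):
--     return _DISALLOWED.sub('_', pn)
-- ===== Notes on version B (the rewrite author's own statement) =====
-- stated objective: idiomatic
-- what changed: A builds a 64-element allowed-character list and scans it for every character in an explicit accumulating loop; B replaces the whole loop with a single precompiled re.sub using the character class [^a-zA-Z0-9_-], so the per-character list scan and the if/else accumulation disappear.
import Mathlib
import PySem

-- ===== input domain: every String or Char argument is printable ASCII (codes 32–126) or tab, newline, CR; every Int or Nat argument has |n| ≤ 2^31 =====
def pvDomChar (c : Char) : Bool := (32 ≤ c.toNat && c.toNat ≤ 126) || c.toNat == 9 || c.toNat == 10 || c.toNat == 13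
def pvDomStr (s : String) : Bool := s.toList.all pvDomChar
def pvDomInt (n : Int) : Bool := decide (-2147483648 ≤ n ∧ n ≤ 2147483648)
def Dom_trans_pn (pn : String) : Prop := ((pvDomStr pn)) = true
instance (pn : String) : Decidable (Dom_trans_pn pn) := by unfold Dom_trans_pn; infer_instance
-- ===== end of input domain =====

-- B replaces A's explicit loop over a rebuilt allowed-character list with a single regex
-- substitution re.sub(r'[^a-zA-Z0-9_-]', '_', pn) (idiomatic; no behaviour change).
-- ===== PORT A =====
-- mark = lowercase ++ uppercase ++ digits ++ ["_", "-"], exactly as A builds it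
def markA : List Char :=
  ((PySem.List.pyRange 97 123 1).map (fun n => Char.ofNat n.toNat)) ++
  ((PySem.List.pyRange 65 91 1).map (fun n => Char.ofNat n.toNat)) ++
  ((PySem.List.pyRange 48 58 1).map (fun n => Char.ofNat n.toNat)) ++ ['_', '-']

def trans_pn (pn : String) : String :=
  String.mk (pn.toList.foldl (fun n_pn w => n_pn ++ [if w ∈ markA then w else '_']) [])

-- ===== PORT B =====
-- the regex character class [^a-zA-Z0-9_-]: a char NOT in these ranges is replaced by '_'
def inClassB (c : Char) : Bool :=
  (97 ≤ c.toNat && c.toNat ≤ 122) || (65 ≤ c.toNat && c.toNat ≤ 90) ||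
  (48 ≤ c.toNat && c.toNat ≤ 57) || c == '_' || c == '-'

def trans_pn_alt (pn : String) : String :=
  String.mk (pn.toList.map (fun c => if inClassB c then c else '_'))

-- ===== PRECONDITION & SPEC =====
def Spec_trans_pn (pn : String) (out : String) : Prop := out = trans_pn_alt pn
instance (pn : String) (out : String) : Decidable (Spec_trans_pn pn out) := by unfold Spec_trans_pn; infer_instance

-- ===== CLAIM (what is proved, stated in full; the proofs are below) =====
def Claim_equal_trans_pn : Prop := ∀ (pn : String), Dom_trans_pn pn → Spec_trans_pn pn (trans_pn pn)

-- ===== LEMMAS AND PROOFS =====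

lemma foldl_snoc_eq_map (f : Char → Char) :
    ∀ (l acc : List Char), l.foldl (fun n_pn w => n_pn ++ [f w]) acc = acc ++ l.map f
  | [], acc => by simp
  | w :: l, acc => by
      simp [List.foldl_cons, foldl_snoc_eq_map f l (acc ++ [f w])]

lemma mem_markA_iff (c : Char) : c ∈ markA ↔ inClassB c = true := by
  constructor
  · intro h
    simp only [markA, List.mem_append, List.mem_map, PySem.List.mem_pyRange_one,
      List.mem_cons, List.not_mem_nil, or_false] at h
    rcases h with ((⟨n, ⟨h1, h2⟩, hc⟩ | ⟨n, ⟨h1, h2⟩, hc⟩) | ⟨n, ⟨h1, h2⟩, hc⟩) | hc | hc <;>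
      first
      | (subst hc;
         have hv : n.toNat < 0xD800 := by omega;
         have ht : (Char.ofNat n.toNat).toNat = n.toNat := by
           simp [Char.ofNat, Char.toNat, hv, Nat.isValidChar, Char.ofNatAux]
         simp only [inClassB, ht]; simp; omega)
      | (subst hc; decide)
  · intro h
    simp only [inClassB, Bool.or_eq_true, decide_eq_true_eq, Bool.and_eq_true, beq_iff_eq] at h
    simp only [markA, List.mem_append, List.mem_map, PySem.List.mem_pyRange_one,
      List.mem_cons, List.not_mem_nil, or_false]
    rcases h with (((h | h) | h) | h) | h
    · exact Or.inl (Or.inl (Or.inl ⟨(c.toNat : Int), ⟨by omega, by omega⟩, by simp [Char.ofNat_toNat]⟩))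
    · exact Or.inl (Or.inl (Or.inr ⟨(c.toNat : Int), ⟨by omega, by omega⟩, by simp [Char.ofNat_toNat]⟩))
    · exact Or.inl (Or.inr ⟨(c.toNat : Int), ⟨by omega, by omega⟩, by simp [Char.ofNat_toNat]⟩)
    · exact Or.inr (Or.inl h)
    · exact Or.inr (Or.inr h)

-- ===== VERDICT (by name: the statement is the Claim_ definition above) =====
theorem trans_pn_spec : Claim_equal_trans_pn := by
  intro pn _
  show trans_pn pn = trans_pn_alt pn
  unfold trans_pn trans_pn_alt
  rw [foldl_snoc_eq_map (fun w => if w ∈ markA then w else '_') pn.toList []]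
  simp only [List.nil_append]
  congr 1
  apply List.map_congr_left
  intro c _
  by_cases h : inClassB c = true
  · rw [if_pos ((mem_markA_iff c).mpr h), if_pos h]
  · rw [if_neg (fun hm => h ((mem_markA_iff c).mp hm)), if_neg h]
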